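-- pv_equiv track=rewrite | github.com/Takamichi-tsutsumi/knock-100 | paiza_change.py | update
-- ===== SOURCE A (Python) =====
-- def get_reversed(s):
--     if s == "b":
--         return "w"
--     elif s == "w":
--         return "b"
--     else:
--         raise KeyError
--
-- def find_index_of_first(arr, first):
--     l = len(arr)
--     for i in range(1, l):
--         if arr[-i] == first:
--             return l - i
--
--     return False
--
-- def find_index_of_last(arr, last):
--     return arr.index(last)
--
-- def update(arr, first):
--     index_first = find_index_of_first(arr, first)
--     index_last = find_index_of_last(arr, get_reversed(first))
--     if index_last == index_first + 1:
--         return "".join(arr)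
--
--     else:
--         inside = [get_reversed(c) for c in arr[index_last:index_first + 1]]
--         new_arr = list(arr)
--         new_arr[index_last:index_first+1] = inside
--         return update(new_arr, first)
-- ===== SOURCE B (Python) =====
-- # Iterative re-implementation: one while-loop over a copied cell list, with the
-- # last occurrence of `first` found via a reversed .index and the window flipped
-- # by a conditional expression (simpler than the recursive helper-based original).
-- def update(arr, first):
--     opp = "w" if first == "b" else "b"
--     cells = list(arr)
--     while True:
--         i = len(cells) - 1 - cells[::-1].index(first)
--         j = cells.index(opp)
--         if j == i + 1:
--             return "".join(cells)
--         cells[j:i + 1] = [opp if c == first else first for c in cells[j:i + 1]]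
-- ===== Notes on version B (the rewrite author's own statement) =====
-- stated objective: simpler
-- what changed: Replaces the recursion with its three helper functions (backward index scan with a False sentinel, .index wrapper, per-char KeyError mapping) by a single iterative while-loop over a copied cell list that finds the last occurrence of first via a reversed .index and flips the window with a conditional expression; Pre_ excludes, besides inputs where A raises, the inputs on which first never occurs in arr, where A's find_index_of_first falls through to 'return False' (read as index 0) yet A can still return a value, while B's natural last-occurrence search raises ValueError.
-- outside the precondition, e.g. on update(['w', 'w'], 'b'): A returns 'bw', B raises ValueError; on update(['x', 'w'], 'b'): A returns 'xw', B raises ValueError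
import Mathlib
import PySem

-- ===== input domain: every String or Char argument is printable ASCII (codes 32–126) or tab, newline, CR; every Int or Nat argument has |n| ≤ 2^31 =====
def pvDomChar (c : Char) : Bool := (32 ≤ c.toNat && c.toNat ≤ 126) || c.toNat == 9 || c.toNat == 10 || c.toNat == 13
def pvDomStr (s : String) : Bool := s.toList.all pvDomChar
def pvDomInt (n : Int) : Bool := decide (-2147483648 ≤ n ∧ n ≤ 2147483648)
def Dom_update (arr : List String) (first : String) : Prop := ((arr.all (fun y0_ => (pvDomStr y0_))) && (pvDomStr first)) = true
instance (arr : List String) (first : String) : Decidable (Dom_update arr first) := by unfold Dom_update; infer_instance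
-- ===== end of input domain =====

-- B replaces A's recursive helper-based simulation by one iterative flip loop
-- (objective: simpler); Pre_ excludes, besides inputs where A raises, the inputs
-- on which `first` never occurs in arr (there B's last-occurrence search raises
-- ValueError while A's False-sentinel scan can still return).


-- ===== PORT A =====

-- get_reversed; none = KeyError
def getReversed? (s : String) : Option String :=
  if s = "b" then some "w" else if s = "w" then some "b" else none

-- the 'for i in range(1, l)' backward scan inside find_index_of_first
def fiofGo (arr : List String) (first : String) (i : Nat) : Int :=
  if i < arr.length then
    if PySem.List.pyGet? arr (-(i : Int)) = some first then (arr.length : Int) - (i : Int)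
    else fiofGo arr first (i + 1)
  else 0
termination_by arr.length - i

-- find_index_of_first; the Python 'return False' is ported as 0, exact because the
-- caller only uses the result in arithmetic, where False == 0
def findIndexOfFirst (arr : List String) (first : String) : Int := fiofGo arr first 1

-- find_index_of_last = arr.index(last); none = ValueError
def findIndexOfLast (arr : List String) (last : String) : Option Nat :=
  PySem.List.index? arr last

-- update; the fuel only makes the recursion total (it is never exhausted on Pre_
-- inputs; none = an exception propagating out of the Python)
def updateFuel : Nat → List String → String → Option String
  | 0, _, _ => none
  | fuel + 1, arr, first =>
    let indexFirst := findIndexOfFirst arr first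
    match getReversed? first with
    | none => none
    | some opp =>
      match findIndexOfLast arr opp with
      | none => none
      | some indexLast =>
        if (indexLast : Int) = indexFirst + 1 then
          some (PySem.Str.join "" arr)
        else
          match (PySem.List.slice arr (some (indexLast : Int)) (some (indexFirst + 1))).mapM getReversed? with
          | none => none
          | some inside =>
            -- slice assignment new_arr[j:i+1] = inside ported by hand, exact CPython
            -- semantics for j = indexLast ≥ 0: arr[:j] ++ inside ++ arr[max(j, i+1):]
            let newArr :=
              PySem.List.slice arr none (some (indexLast : Int)) ++ inside ++
              PySem.List.slice arr (some (max (indexLast : Int) (indexFirst + 1))) none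
            updateFuel fuel newArr first

def update (arr : List String) (first : String) : String :=
  (updateFuel (arr.length + 2) arr first).getD ""

-- ===== PORT B =====

-- the 'while True' loop of Source B; the fuel only makes it total (never exhausted on
-- Pre_ inputs; none = an exception propagating out of the Python)
def altLoop : Nat → List String → String → String → Option String
  | 0, _, _, _ => none
  | fuel + 1, cells, first, opp =>
    match PySem.List.slice? cells none none (-1) with   -- cells[::-1]
    | none => none
    | some rev =>
      match PySem.List.index? rev first with            -- .index(first); none = ValueError
      | none => none
      | some ri =>
        let i : Int := (cells.length : Int) - 1 - (ri : Int)
        match PySem.List.index? cells opp with          -- cells.index(opp); none = ValueError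
        | none => none
        | some j =>
          if (j : Int) = i + 1 then some (PySem.Str.join "" cells)
          else
            let inside := (PySem.List.slice cells (some (j : Int)) (some (i + 1))).map
              (fun c => if c = first then opp else first)
            -- slice assignment cells[j:i+1] = inside, exact CPython semantics for j ≥ 0
            altLoop fuel
              (PySem.List.slice cells none (some (j : Int)) ++ inside ++
                PySem.List.slice cells (some (max (j : Int) (i + 1))) none) first opp

def update_alt (arr : List String) (first : String) : String :=
  let opp := if first = "b" then "w" else "b"
  (altLoop (arr.length + 2) arr first opp).getD ""

-- ===== PRECONDITION & SPEC =====

-- the index A's find_index_of_first computes, as a plain input observation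
def pvLastF (arr : List String) (first : String) : Nat :=
  (List.range arr.length).foldl
    (fun acc t => if 1 ≤ t ∧ arr.getD t "" = first then t else acc) 0

-- Pre_ is exactly the set of inputs on which A returns AND first occurs in arr:
-- first is a colour, both colours occur, and the active window from the first
-- opposite cell to the last first-coloured cell is pure b/w (or already closed,
-- idxOf opp = lastF + 1).  Besides the inputs where A raises (KeyError/ValueError/
-- unbounded recursion), Pre_ excludes the inputs on which first never occurs in
-- arr: there A's find_index_of_first falls through to 'return False' (read as
-- index 0) yet A can still return a value, while B's natural last-occurrence
-- search raises ValueError.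
def Pre_update (arr : List String) (first : String) : Prop :=
  (first = "b" ∨ first = "w") ∧ first ∈ arr ∧
  (if first = "b" then "w" else "b") ∈ arr ∧
  List.idxOf (if first = "b" then "w" else "b") arr ≤ pvLastF arr first + 1 ∧
  ∀ t ∈ List.range arr.length,
    List.idxOf (if first = "b" then "w" else "b") arr ≤ t → t ≤ pvLastF arr first →
    (arr.getD t "" = "b" ∨ arr.getD t "" = "w")
instance (arr : List String) (first : String) : Decidable (Pre_update arr first) := by
  unfold Pre_update; infer_instance

def pvWitness_update : List String × String := (["b", "w"], "b")

def Spec_update (arr : List String) (first : String) (out : String) : Prop := out = update_alt arr first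
instance (arr : List String) (first : String) (out : String) : Decidable (Spec_update arr first out) := by unfold Spec_update; infer_instance

-- ===== CLAIM (what is proved, stated in full; the proofs are below) =====
def Claim_equal_update : Prop := ∀ (arr : List String) (first : String), Dom_update arr first → Pre_update arr first → Spec_update arr first (update arr first)

-- ===== LEMMAS AND PROOFS =====

-- the loop invariant: both colours occur, the window is closed or open, and open
-- windows are pure b/w
def InvBW (first opp : String) (arr : List String) : Prop :=
  first ∈ arr ∧ opp ∈ arr ∧
  List.idxOf opp arr ≤ pvLastF arr first + 1 ∧
  ∀ t, List.idxOf opp arr ≤ t → t ≤ pvLastF arr first → t < arr.length →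
    (arr.getD t "" = "b" ∨ arr.getD t "" = "w")

-- the common successor array of one flip round
def flipWin (first opp : String) (arr : List String) : List String :=
  arr.take (List.idxOf opp arr) ++
    ((arr.drop (List.idxOf opp arr)).take (pvLastF arr first + 1 - List.idxOf opp arr)).map
      (fun c => if c = first then opp else first) ++
    arr.drop (pvLastF arr first + 1)

-- ---- A-side: find_index_of_first ----

lemma fiofGo_stop (arr : List String) (f : String) (i : Nat) (h : arr.length ≤ i) :
    fiofGo arr f i = 0 := by
  rw [fiofGo]
  simp [Nat.not_lt.2 h]

lemma fiofGo_hit (arr : List String) (f : String) (i : Nat) (h : i < arr.length)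
    (hg : PySem.List.pyGet? arr (-(i : Int)) = some f) :
    fiofGo arr f i = (arr.length : Int) - (i : Int) := by
  rw [fiofGo]
  simp [h, hg]

lemma fiofGo_skip (arr : List String) (f : String) :
    ∀ (d i : Nat), i + d ≤ arr.length →
    (∀ t, i ≤ t → t < i + d → PySem.List.pyGet? arr (-(t : Int)) ≠ some f) →
    fiofGo arr f i = fiofGo arr f (i + d) := by
  intro d
  induction d with
  | zero => intro i _ _; rfl
  | succ d ih =>
    intro i hle hmiss
    have hi : i < arr.length := by omega
    have h1 : fiofGo arr f i = fiofGo arr f (i + 1) := by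
      rw [fiofGo]
      simp [hi, hmiss i (le_refl i) (by omega)]
    rw [h1, ih (i + 1) (by omega) (fun t ht1 ht2 => hmiss t (by omega) (by omega))]
    congr 1
    omega

lemma pyGet_tail (zs tail : List String) (f : String) (htail : ∀ x ∈ tail, x ≠ f) (t : Nat)
    (h1 : 1 ≤ t) (h2 : t ≤ tail.length) :
    PySem.List.pyGet? (zs ++ tail) (-(t : Int)) ≠ some f := by
  have hlen : (zs ++ tail).length = zs.length + tail.length := by simp
  rw [PySem.List.pyGet?_neg_natCast (zs ++ tail) t h1 (by omega)]
  rw [hlen]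
  rw [List.getElem?_append_right (by omega)]
  intro h
  exact htail f (List.mem_of_getElem? h) rfl

lemma fiof_tail (zs tail : List String) (f : String) (htail : ∀ x ∈ tail, x ≠ f)
    (hz : zs.getLast? = some f) :
    findIndexOfFirst (zs ++ tail) f = (zs.length : Int) - 1 := by
  have hzne : zs ≠ [] := by intro h; rw [h] at hz; simp at hz
  have hplen : 1 ≤ zs.length := List.length_pos_iff.mpr hzne
  have hlen : (zs ++ tail).length = zs.length + tail.length := by simp
  have hskip := fiofGo_skip (zs ++ tail) f tail.length 1 (by omega)
    (fun t ht1 ht2 => pyGet_tail zs tail f htail t ht1 (by omega))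
  unfold findIndexOfFirst
  rw [hskip]
  by_cases hp : 2 ≤ zs.length
  · have hi : 1 + tail.length < (zs ++ tail).length := by omega
    have hget : PySem.List.pyGet? (zs ++ tail) (-((1 + tail.length : Nat) : Int)) = some f := by
      rw [PySem.List.pyGet?_neg_natCast (zs ++ tail) (1 + tail.length) (by omega) (by omega)]
      rw [hlen]
      rw [List.getElem?_append_left (by omega)]
      have h5 : zs.length + tail.length - (1 + tail.length) = zs.length - 1 := by omega
      rw [h5, ← List.getLast?_eq_getElem?]
      exact hz
    rw [fiofGo_hit _ _ _ hi hget, hlen]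
    push_cast
    omega
  · have hp1 : zs.length = 1 := by omega
    rw [fiofGo_stop _ _ _ (by omega)]
    rw [hp1]
    simp

lemma fiof_none (z : String) (tail : List String) (f : String)
    (htail : ∀ x ∈ tail, x ≠ f) :
    findIndexOfFirst (z :: tail) f = 0 := by
  unfold findIndexOfFirst
  have hlen : (z :: tail).length = 1 + tail.length := by simp; omega
  have hskip := fiofGo_skip (z :: tail) f tail.length 1 (by omega)
    (fun t ht1 ht2 => by
      have := pyGet_tail [z] tail f htail t ht1 (by omega)
      simpa using this)
  rw [hskip]
  exact fiofGo_stop _ _ _ (by omega)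

-- ---- getD / getElem? glue ----

lemma getD_of_drop_some (arr : List String) (m k : Nat) (x : String)
    (h1 : (arr.drop m)[k]? = some x) :
    m + k < arr.length ∧ arr.getD (m + k) "" = x := by
  rw [List.getElem?_drop] at h1
  have h2 : m + k < arr.length := by
    by_contra h
    rw [List.getElem?_eq_none (by omega)] at h1
    simp at h1
  refine ⟨h2, ?_⟩
  rw [List.getD_eq_getElem _ "" h2]
  rw [List.getElem?_eq_getElem h2] at h1
  exact Option.some_inj.mp h1

lemma getD_eq_of_getElem? (l : List String) (t : Nat) (x : String) (h : l[t]? = some x) :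
    l.getD t "" = x := by
  have ht : t < l.length := by
    by_contra hc
    rw [List.getElem?_eq_none (by omega)] at h
    simp at h
  rw [List.getD_eq_getElem _ "" ht]
  rw [List.getElem?_eq_getElem ht] at h
  exact Option.some_inj.mp h

lemma mem_of_getD (l : List String) (t : Nat) (x : String) (ht : t < l.length)
    (h : l.getD t "" = x) : x ∈ l := by
  rw [List.getD_eq_getElem _ "" ht] at h
  exact h ▸ List.getElem_mem ht

-- ---- the scan for pvLastF ----

lemma lastF_go (arr : List String) (f : String) : ∀ (n : Nat),
    (((List.range n).foldl
        (fun acc t => if 1 ≤ t ∧ arr.getD t "" = f then t else acc) 0) = 0 ∨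
      (1 ≤ ((List.range n).foldl
        (fun acc t => if 1 ≤ t ∧ arr.getD t "" = f then t else acc) 0) ∧
       ((List.range n).foldl
        (fun acc t => if 1 ≤ t ∧ arr.getD t "" = f then t else acc) 0) < n ∧
       arr.getD ((List.range n).foldl
        (fun acc t => if 1 ≤ t ∧ arr.getD t "" = f then t else acc) 0) "" = f)) ∧
    (∀ t, ((List.range n).foldl
        (fun acc t => if 1 ≤ t ∧ arr.getD t "" = f then t else acc) 0) < t → t < n →
      arr.getD t "" ≠ f) := by
  intro n
  induction n with
  | zero => simp
  | succ n ih =>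
    obtain ⟨ih1, ih2⟩ := ih
    rw [List.range_succ, List.foldl_append, List.foldl_cons, List.foldl_nil]
    by_cases hg : 1 ≤ n ∧ arr.getD n "" = f
    · rw [if_pos hg]
      refine ⟨Or.inr ⟨hg.1, by omega, hg.2⟩, ?_⟩
      intro t ht1 ht2 _
      omega
    · rw [if_neg hg]
      refine ⟨?_, ?_⟩
      · rcases ih1 with h | h
        · exact Or.inl h
        · exact Or.inr ⟨h.1, by omega, h.2.2⟩
      · intro t ht1 ht2
        by_cases htn : t = n
        · subst htn
          intro he
          rcases ih1 with h | h
          · rw [h] at ht1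
            exact hg ⟨by omega, he⟩
          · exact hg ⟨by omega, he⟩
        · exact ih2 t ht1 (by omega)

lemma lastF_spec (arr : List String) (f : String) :
    (pvLastF arr f = 0 ∨ (1 ≤ pvLastF arr f ∧ pvLastF arr f < arr.length ∧
      arr.getD (pvLastF arr f) "" = f)) ∧
    (∀ t, pvLastF arr f < t → t < arr.length → arr.getD t "" ≠ f) := by
  have := lastF_go arr f arr.length
  simpa [pvLastF] using this

lemma fiof_eq_lastF (arr : List String) (f : String) (hne : arr ≠ []) :
    findIndexOfFirst arr f = ((pvLastF arr f : Nat) : Int) := by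
  obtain ⟨hs1, hs2⟩ := lastF_spec arr f
  rcases hs1 with h0 | ⟨h1, h2, h3⟩
  · rw [h0]
    cases arr with
    | nil => exact absurd rfl hne
    | cons z tl =>
      rw [fiof_none z tl f ?_]
      · simp
      intro x hx he
      obtain ⟨k, hk, hkx⟩ := List.getElem_of_mem hx
      have h1 : ((z :: tl).drop 1)[k]? = some f := by
        rw [show (z :: tl).drop 1 = tl from rfl, List.getElem?_eq_getElem hk, hkx, he]
      obtain ⟨h2, h3⟩ := getD_of_drop_some (z :: tl) 1 k f h1
      exact hs2 (1 + k) (by omega) h2 h3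
  · have hzlen : (arr.take (pvLastF arr f + 1)).length = pvLastF arr f + 1 := by
      rw [List.length_take]
      omega
    have hzlast : (arr.take (pvLastF arr f + 1)).getLast? = some f := by
      rw [List.getLast?_eq_getElem?, hzlen]
      simp only [Nat.add_sub_cancel]
      rw [List.getElem?_take_of_lt (by omega)]
      rw [List.getElem?_eq_getElem h2]
      rw [← List.getD_eq_getElem arr "" h2, h3]
    have htail : ∀ x ∈ arr.drop (pvLastF arr f + 1), x ≠ f := by
      intro x hx he
      obtain ⟨k, hk, hkx⟩ := List.getElem_of_mem hx
      have h1 : (arr.drop (pvLastF arr f + 1))[k]? = some f := by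
        rw [List.getElem?_eq_getElem hk, hkx, he]
      obtain ⟨h2, h3⟩ := getD_of_drop_some arr (pvLastF arr f + 1) k f h1
      exact hs2 (pvLastF arr f + 1 + k) (by omega) h2 h3
    conv_lhs => rw [show arr = arr.take (pvLastF arr f + 1) ++ arr.drop (pvLastF arr f + 1) from
      (List.take_append_drop _ _).symm]
    rw [fiof_tail _ _ f htail hzlast]
    rw [hzlen]
    push_cast
    omega

-- ---- index? / idxOf ----

lemma idxOf_spec (o : String) : ∀ (l : List String), o ∈ l →
    PySem.List.index? l o = some (l.idxOf o) ∧ l.idxOf o < l.length ∧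
    l[l.idxOf o]? = some o ∧ ∀ x ∈ l.take (l.idxOf o), x ≠ o := by
  intro l
  induction l with
  | nil => intro h; simp at h
  | cons z t ih =>
    intro hm
    by_cases hz : z = o
    · subst hz
      refine ⟨by rw [PySem.List.index?_cons_self, List.idxOf_cons_self], ?_, ?_, ?_⟩
      · simp [List.idxOf_cons_self]
      · simp [List.idxOf_cons_self]
      · simp [List.idxOf_cons_self]
    · have hmt : o ∈ t := by
        rcases List.mem_cons.mp hm with h | h
        · exact absurd h.symm hz
        · exact h
      obtain ⟨i1, i2, i3, i4⟩ := ih hmt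
      have hidxc : (z :: t).idxOf o = t.idxOf o + 1 := List.idxOf_cons_ne t hz
      refine ⟨?_, ?_, ?_, ?_⟩
      · rw [PySem.List.index?_cons_of_ne _ hz, i1, hidxc]
        rfl
      · rw [hidxc]
        simpa using i2
      · rw [hidxc]
        simpa using i3
      · rw [hidxc]
        intro x hx
        rw [List.take_succ_cons] at hx
        rcases List.mem_cons.mp hx with h | h
        · subst h; exact hz
        · exact i4 x h

-- the reversed .index finds exactly A's backward-scan index when first ∈ arr
lemma mem_take_of_getD (l : List String) (m t : Nat) (x : String) (h1 : t < m)
    (h2 : t < l.length) (h3 : l.getD t "" = x) : x ∈ l.take m := by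
  have h4 : (l.take m)[t]? = some x := by
    rw [List.getElem?_take_of_lt h1, List.getElem?_eq_getElem h2,
      ← List.getD_eq_getElem l "" h2, h3]
  exact List.mem_of_getElem? h4

lemma rev_index_spec (arr : List String) (f : String) (h : f ∈ arr) :
    ∃ r, PySem.List.index? arr.reverse f = some r ∧ r < arr.length ∧
      arr.length - 1 - r = pvLastF arr f := by
  have hrev : f ∈ arr.reverse := List.mem_reverse.mpr h
  obtain ⟨i1, i2, i3, i4⟩ := idxOf_spec f arr.reverse hrev
  have hrlen : arr.reverse.idxOf f < arr.length := by simpa using i2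
  refine ⟨arr.reverse.idxOf f, i1, hrlen, ?_⟩
  rw [List.getElem?_reverse hrlen] at i3
  have hgdL : arr.getD (arr.length - 1 - arr.reverse.idxOf f) "" = f :=
    getD_eq_of_getElem? _ _ _ i3
  have hbeyond : ∀ s, arr.length - 1 - arr.reverse.idxOf f < s → s < arr.length →
      arr.getD s "" ≠ f := by
    intro s hs1 hs2 hsf
    have ht : arr.length - 1 - s < arr.reverse.idxOf f := by omega
    apply i4 f ?_ rfl
    apply mem_take_of_getD arr.reverse (arr.reverse.idxOf f) (arr.length - 1 - s) f ht
      (by simp; omega)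
    apply getD_eq_of_getElem?
    rw [List.getElem?_reverse (by omega)]
    rw [show arr.length - 1 - (arr.length - 1 - s) = s by omega]
    rw [List.getElem?_eq_getElem hs2, ← List.getD_eq_getElem arr "" hs2, hsf]
  obtain ⟨hs1, hs2⟩ := lastF_spec arr f
  have hLlt : arr.length - 1 - arr.reverse.idxOf f < arr.length := by omega
  have hge : arr.length - 1 - arr.reverse.idxOf f ≤ pvLastF arr f := by
    by_contra hcon
    exact hs2 _ (by omega) hLlt hgdL
  have hle2 : pvLastF arr f ≤ arr.length - 1 - arr.reverse.idxOf f := by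
    rcases hs1 with h0 | ⟨p1, p2, p3⟩
    · omega
    · by_contra hcon
      exact hbeyond (pvLastF arr f) (by omega) p2 p3
  omega

-- ---- window flipping ----

lemma mapM_flip (first opp : String)
    (hc : (first = "b" ∧ opp = "w") ∨ (first = "w" ∧ opp = "b")) :
    ∀ l : List String, (∀ c ∈ l, c = "b" ∨ c = "w") →
    l.mapM getReversed? = some (l.map (fun c => if c = first then opp else first)) := by
  intro l
  induction l with
  | nil => intro _; rfl
  | cons c t ih =>
    intro h
    have hct := ih (fun x hx => h x (List.mem_cons_of_mem _ hx))
    have hcc := h c (by simp)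
    rw [List.mapM_cons, hct]
    rcases hc with ⟨h1, h2⟩ | ⟨h1, h2⟩ <;> subst h1 <;> subst h2 <;>
      rcases hcc with h3 | h3 <;> subst h3 <;> simp [getReversed?]

lemma mem_take_drop (arr : List String) (j m : Nat) (c : String)
    (h : c ∈ (arr.drop j).take m) :
    ∃ t, j ≤ t ∧ t < j + m ∧ t < arr.length ∧ arr.getD t "" = c := by
  obtain ⟨k, hk, hkx⟩ := List.getElem_of_mem h
  have h1 : ((arr.drop j).take m)[k]? = some c := by
    rw [List.getElem?_eq_getElem hk, hkx]
  have hkm : k < m := by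
    have := hk
    simp only [List.length_take, List.length_drop] at this
    omega
  rw [List.getElem?_take_of_lt hkm] at h1
  obtain ⟨h2, h3⟩ := getD_of_drop_some arr j k c h1
  exact ⟨j + k, by omega, by omega, h2, h3⟩

-- getD of the flipped array
lemma flipWin_getD (first opp arr) (hj : List.idxOf opp arr ≤ pvLastF arr first)
    (hi : pvLastF arr first < arr.length) :
    (flipWin first opp arr).length = arr.length ∧
    (∀ t, t < arr.length →
      (flipWin first opp arr).getD t "" =
        if List.idxOf opp arr ≤ t ∧ t ≤ pvLastF arr first then
          (if arr.getD t "" = first then opp else first)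
        else arr.getD t "") := by
  have hlen1 : (arr.take (List.idxOf opp arr)).length = List.idxOf opp arr := by
    rw [List.length_take]; omega
  have hlen2 : (((arr.drop (List.idxOf opp arr)).take
      (pvLastF arr first + 1 - List.idxOf opp arr)).map
      (fun c => if c = first then opp else first)).length
      = pvLastF arr first + 1 - List.idxOf opp arr := by
    rw [List.length_map, List.length_take, List.length_drop]; omega
  have hlen3 : (arr.drop (pvLastF arr first + 1)).length
      = arr.length - (pvLastF arr first + 1) := by rw [List.length_drop]
  constructor
  · unfold flipWin
    simp only [List.length_append, hlen1, hlen2, hlen3]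
    omega
  intro t ht
  unfold flipWin
  by_cases h1 : t < List.idxOf opp arr
  · rw [if_neg (by omega)]
    apply getD_eq_of_getElem?
    rw [List.getElem?_append_left (by rw [List.length_append, hlen1, hlen2]; omega)]
    rw [List.getElem?_append_left (by rw [hlen1]; omega)]
    rw [List.getElem?_take_of_lt h1]
    rw [List.getElem?_eq_getElem ht, List.getD_eq_getElem _ "" ht]
  · by_cases h2 : t ≤ pvLastF arr first
    · rw [if_pos ⟨by omega, h2⟩]
      apply getD_eq_of_getElem?
      rw [List.getElem?_append_left (by rw [List.length_append, hlen1, hlen2]; omega)]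
      rw [List.getElem?_append_right (by rw [hlen1]; omega)]
      rw [hlen1, List.getElem?_map, List.getElem?_take_of_lt (by omega), List.getElem?_drop]
      rw [show List.idxOf opp arr + (t - List.idxOf opp arr) = t by omega]
      rw [List.getElem?_eq_getElem ht]
      rw [List.getD_eq_getElem _ "" ht]
      rfl
    · rw [if_neg (by omega)]
      apply getD_eq_of_getElem?
      rw [List.getElem?_append_right (by rw [List.length_append, hlen1, hlen2]; omega)]
      rw [List.length_append, hlen1, hlen2, List.getElem?_drop]
      rw [show pvLastF arr first + 1 +
        (t - (List.idxOf opp arr + (pvLastF arr first + 1 - List.idxOf opp arr))) = t by omega]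
      rw [List.getElem?_eq_getElem ht, List.getD_eq_getElem _ "" ht]

-- the invariant is preserved by one open-window flip
lemma inv_step (first opp : String)
    (hc : (first = "b" ∧ opp = "w") ∨ (first = "w" ∧ opp = "b"))
    (arr : List String) (hInv : InvBW first opp arr)
    (hact : List.idxOf opp arr ≤ pvLastF arr first) :
    InvBW first opp (flipWin first opp arr) := by
  obtain ⟨hfmem, homem, hle, hwin⟩ := hInv
  obtain ⟨j1, j2, j3, j4⟩ := idxOf_spec opp arr homem
  obtain ⟨hs1, hs2⟩ := lastF_spec arr first
  have hfo : first ≠ opp := by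
    rcases hc with ⟨e1, e2⟩ | ⟨e1, e2⟩ <;> subst e1 <;> subst e2 <;> simp
  have hgj : arr.getD (List.idxOf opp arr) "" = opp := getD_eq_of_getElem? _ _ _ j3
  have hi1 : 1 ≤ pvLastF arr first := by
    by_contra hcon
    have hj0 : List.idxOf opp arr = 0 := by omega
    obtain ⟨p, hp, hpx⟩ := List.getElem_of_mem hfmem
    have hgp : arr.getD p "" = first := by rw [List.getD_eq_getElem _ "" hp, hpx]
    rcases Nat.eq_zero_or_pos p with h | h
    · rw [h] at hgp
      rw [hj0] at hgj
      exact hfo (by rw [← hgp, hgj])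
    · exact hs2 p (by omega) hp hgp
  have hii : pvLastF arr first < arr.length := by
    rcases hs1 with h0 | ⟨_, p2, _⟩
    · omega
    · exact p2
  have hgi : arr.getD (pvLastF arr first) "" = first := by
    rcases hs1 with h0 | ⟨_, _, p3⟩
    · omega
    · exact p3
  obtain ⟨hAlen, hAget⟩ := flipWin_getD first opp arr hact hii
  have hgAj : (flipWin first opp arr).getD (List.idxOf opp arr) "" = first := by
    rw [hAget _ (by omega), if_pos ⟨le_refl _, hact⟩, hgj]
    by_cases h : opp = first
    · rw [if_pos h, h]
    · rw [if_neg h]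
  have hgAi : (flipWin first opp arr).getD (pvLastF arr first) "" = opp := by
    rw [hAget _ hii, if_pos ⟨hact, le_refl _⟩, hgi, if_pos rfl]
  have hfA : first ∈ flipWin first opp arr :=
    mem_of_getD _ _ _ (by rw [hAlen]; omega) hgAj
  have hoA : opp ∈ flipWin first opp arr :=
    mem_of_getD _ _ _ (by rw [hAlen]; omega) hgAi
  obtain ⟨a1, a2, a3, a4⟩ := idxOf_spec opp (flipWin first opp arr) hoA
  obtain ⟨b1, b2⟩ := lastF_spec (flipWin first opp arr) first
  have hgAj' : (flipWin first opp arr).getD (List.idxOf opp (flipWin first opp arr)) "" = opp :=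
    getD_eq_of_getElem? _ _ _ a3
  rw [hAlen] at a2
  have hjj' : List.idxOf opp arr < List.idxOf opp (flipWin first opp arr) := by
    by_contra hcon
    push Not at hcon
    rcases Nat.lt_or_eq_of_le hcon with h | h
    · have hout : (flipWin first opp arr).getD (List.idxOf opp (flipWin first opp arr)) ""
          = arr.getD (List.idxOf opp (flipWin first opp arr)) "" := by
        rw [hAget _ (by omega), if_neg (by omega)]
      exact j4 opp (mem_take_of_getD arr _ _ opp h (by omega) (by rw [← hout, hgAj'])) rfl
    · rw [h] at hgAj'
      rw [hgAj] at hgAj'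
      exact hfo hgAj'
  have hj'i : List.idxOf opp (flipWin first opp arr) ≤ pvLastF arr first := by
    by_contra hcon
    exact a4 opp (mem_take_of_getD (flipWin first opp arr) _ _ opp (by omega)
      (by rw [hAlen]; omega) hgAi) rfl
  have hi'le : pvLastF (flipWin first opp arr) first ≤ pvLastF arr first - 1 := by
    by_contra hcon
    push Not at hcon
    rcases b1 with h0 | ⟨q1, q2, q3⟩
    · omega
    · rw [hAlen] at q2
      rcases Nat.lt_or_eq_of_le (show pvLastF arr first ≤ pvLastF (flipWin first opp arr) first by omega) with h | h
      · have hout : (flipWin first opp arr).getD (pvLastF (flipWin first opp arr) first) ""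
            = arr.getD (pvLastF (flipWin first opp arr) first) "" := by
          rw [hAget _ q2, if_neg (by omega)]
        exact hs2 _ h q2 (by rw [← hout]; exact q3)
      · rw [← h] at q3
        rw [hgAi] at q3
        exact hfo q3.symm
  have hw1 : (flipWin first opp arr).getD (List.idxOf opp (flipWin first opp arr) - 1) "" = first := by
    have hA : (flipWin first opp arr).getD (List.idxOf opp (flipWin first opp arr) - 1) ""
        = (if arr.getD (List.idxOf opp (flipWin first opp arr) - 1) "" = first then opp else first) := by
      rw [hAget _ (by omega), if_pos ⟨by omega, by omega⟩]
    have hne_opp : (flipWin first opp arr).getD (List.idxOf opp (flipWin first opp arr) - 1) "" ≠ opp := by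
      intro he
      exact a4 opp (mem_take_of_getD (flipWin first opp arr) _ _ opp (by omega)
        (by rw [hAlen]; omega) he) rfl
    by_cases h : arr.getD (List.idxOf opp (flipWin first opp arr) - 1) "" = first
    · exfalso
      apply hne_opp
      rw [hA, if_pos h]
    · rw [hA, if_neg h]
  have hj'i' : List.idxOf opp (flipWin first opp arr) ≤ pvLastF (flipWin first opp arr) first + 1 := by
    by_cases h0 : List.idxOf opp (flipWin first opp arr) - 1 = 0
    · omega
    · by_contra hcon
      exact b2 _ (by omega) (by rw [hAlen]; omega) hw1
  refine ⟨hfA, hoA, hj'i', ?_⟩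
  intro t ht1 ht2 ht3
  rw [hAlen] at ht3
  have hAt : (flipWin first opp arr).getD t ""
      = (if arr.getD t "" = first then opp else first) := by
    rw [hAget t ht3, if_pos ⟨by omega, by omega⟩]
  have hbw := hwin t (by omega) (by omega) ht3
  rcases hc with ⟨e1, e2⟩ | ⟨e1, e2⟩ <;> subst e1 <;> subst e2 <;>
    rcases hbw with h | h <;> rw [hAt, h] <;> simp

-- both ports build their next state from the same three slices
lemma slice_state (arr l : List String) (j i : Nat) (hj : j ≤ i + 1) :
    PySem.List.slice arr none (some ((j : Nat) : Int)) ++ l ++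
      PySem.List.slice arr (some (max ((j : Nat) : Int) (((i : Nat) : Int) + 1))) none
    = arr.take j ++ l ++ arr.drop (i + 1) := by
  rw [PySem.List.slice_to_natCast]
  rw [show (max ((j : Nat) : Int) (((i : Nat) : Int) + 1)) = (((i + 1 : Nat)) : Int) by
    rw [max_eq_right (by omega)]
    push_cast
    ring]
  rw [PySem.List.slice_from_natCast]

-- one round of A equals one round of B, forever
lemma loop_eq (first opp : String)
    (hc : (first = "b" ∧ opp = "w") ∨ (first = "w" ∧ opp = "b")) :
    ∀ (fuel : Nat) (arr : List String), InvBW first opp arr →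
      updateFuel fuel arr first = altLoop fuel arr first opp := by
  intro fuel
  induction fuel with
  | zero => intro arr _; rfl
  | succ fuel ih =>
    intro arr hInv
    obtain ⟨hfmem, homem, hle, hwin⟩ := hInv
    have hane : arr ≠ [] := by
      intro h
      rw [h] at homem
      simp at homem
    have hrevf : getReversed? first = some opp := by
      rcases hc with ⟨e1, e2⟩ | ⟨e1, e2⟩ <;> subst e1 <;> subst e2 <;> rfl
    obtain ⟨i1, i2, i3, i4⟩ := idxOf_spec opp arr homem
    have hfio : findIndexOfFirst arr first = ((pvLastF arr first : Nat) : Int) :=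
      fiof_eq_lastF arr first hane
    obtain ⟨r, hr1, hr2, hr3⟩ := rev_index_spec arr first hfmem
    have hiInt : (arr.length : Int) - 1 - (r : Int) = ((pvLastF arr first : Nat) : Int) := by
      omega
    have hii : pvLastF arr first < arr.length := by
      obtain ⟨hs1, _⟩ := lastF_spec arr first
      rcases hs1 with h0 | ⟨_, p2, _⟩
      · have := List.length_pos_iff.mpr hane
        omega
      · exact p2
    by_cases hij : ((List.idxOf opp arr : Nat) : Int) = ((pvLastF arr first : Nat) : Int) + 1
    · simp only [updateFuel, altLoop, findIndexOfLast, hrevf, hfio, i1,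
        PySem.List.slice?_none_none_neg_one, hr1, hiInt, if_pos hij]
    · have hact : List.idxOf opp arr ≤ pvLastF arr first := by omega
      have hslice_eq : PySem.List.slice arr (some ((List.idxOf opp arr : Nat) : Int))
          (some (((pvLastF arr first : Nat) : Int) + 1))
          = (arr.drop (List.idxOf opp arr)).take (pvLastF arr first + 1 - List.idxOf opp arr) := by
        rw [show ((pvLastF arr first : Nat) : Int) + 1 = (((pvLastF arr first + 1 : Nat)) : Int) by
          push_cast; ring]
        rw [PySem.List.slice_natCast]
      have hpure : ∀ c ∈ (arr.drop (List.idxOf opp arr)).take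
          (pvLastF arr first + 1 - List.idxOf opp arr), c = "b" ∨ c = "w" := by
        intro c hcmem
        obtain ⟨t, ht1, ht2, ht3, ht4⟩ := mem_take_drop arr _ _ c hcmem
        exact ht4 ▸ hwin t ht1 (by omega) ht3
      have hmapM := mapM_flip first opp hc _ hpure
      simp only [updateFuel, altLoop, findIndexOfLast, hrevf, hfio, i1,
        PySem.List.slice?_none_none_neg_one, hr1, hiInt, if_neg hij, hslice_eq, hmapM]
      rw [slice_state arr _ (List.idxOf opp arr) (pvLastF arr first) (by omega)]
      exact ih (arr.take (List.idxOf opp arr) ++ _ ++ arr.drop (pvLastF arr first + 1))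
        (by
          have hfw : arr.take (List.idxOf opp arr) ++
              ((arr.drop (List.idxOf opp arr)).take
                (pvLastF arr first + 1 - List.idxOf opp arr)).map
                (fun c => if c = first then opp else first) ++
              arr.drop (pvLastF arr first + 1) = flipWin first opp arr := rfl
          rw [hfw]
          exact inv_step first opp hc arr ⟨hfmem, homem, hle, hwin⟩ hact)

-- ===== VERDICT (by name: the statement is the Claim_ definition above) =====
theorem update_spec : Claim_equal_update := by
  intro arr first _ hPre
  obtain ⟨hf, hfmem, homem, hle, hwin⟩ := hPre
  unfold Spec_update update update_alt
  have hc : (first = "b" ∧ (if first = "b" then "w" else "b") = "w") ∨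
      (first = "w" ∧ (if first = "b" then "w" else "b") = "b") := by
    rcases hf with h | h <;> subst h <;> simp
  have hInv : InvBW first (if first = "b" then "w" else "b") arr :=
    ⟨hfmem, homem, hle, fun t h1 h2 h3 => hwin t (List.mem_range.mpr h3) h1 h2⟩
  rw [loop_eq first (if first = "b" then "w" else "b") hc (arr.length + 2) arr hInv]
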